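-- pv_equiv track=rewrite | github.com/Relaxed-System-Lab/HexGen | HexGen-dev/hexgen/hexgen_core/gen_p2p_lists.py | generate_send_recv_lists
-- ===== SOURCE A (Python) =====
-- def generate_send_recv_lists(pipeline_groups, mainline):
--     # initialize empty send and receive lists for each rank
--     ranks = set(rank for group in pipeline_groups for rank in group)
--     SendList = {rank: [] for rank in ranks}
--     RecvList = {rank: [] for rank in ranks}
--     SendBoolean = {rank: [] for rank in ranks}
--     RecvBoolean = {rank: [] for rank in ranks}
--
--     # fill up send and receive lists based on pipeline groups
--     for group in pipeline_groups:
--         is_mainline = set(group) == set(mainline)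
--         for i in range(len(group) - 1):
--             # Avoid appending duplicates
--             if group[i+1] not in SendList[group[i]]:
--                 SendList[group[i]].append(group[i+1])
--                 SendBoolean[group[i]].append(not is_mainline)
--             if group[i] not in RecvList[group[i+1]]:
--                 RecvList[group[i+1]].append(group[i])
--                 RecvBoolean[group[i+1]].append(not is_mainline)
--
--     return SendList, RecvList, SendBoolean, RecvBoolean
-- ===== SOURCE B (Python) =====
-- def generate_send_recv_lists(pipeline_groups, mainline):
--     # initialize empty send and receive lists for each rank
--     ranks = set(rank for group in pipeline_groups for rank in group)
--     SendList = {rank: [] for rank in ranks}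
--     RecvList = {rank: [] for rank in ranks}
--     SendBoolean = {rank: [] for rank in ranks}
--     RecvBoolean = {rank: [] for rank in ranks}
--
--     # pass 1: record each directed edge once, with the flag of its first appearance
--     edge_flag = {}
--     for group in pipeline_groups:
--         flag = set(group) != set(mainline)
--         for src, dst in zip(group, group[1:]):
--             edge_flag.setdefault((src, dst), flag)
--
--     # pass 2: distribute the deduplicated edges; no output list is ever scanned
--     for (src, dst), flag in edge_flag.items():
--         SendList[src].append(dst)
--         SendBoolean[src].append(flag)
--         RecvList[dst].append(src)
--         RecvBoolean[dst].append(flag)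
--
--     return SendList, RecvList, SendBoolean, RecvBoolean
-- ===== Notes on version B (the rewrite author's own statement) =====
-- stated objective: alternative
-- what changed: Replaces A's per-edge membership scans of the growing output lists by two passes: an insertion-ordered edge dict built with setdefault (first-occurrence dedup), then one distribution pass appending to the per-rank lists without ever scanning them.
import Mathlib
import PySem

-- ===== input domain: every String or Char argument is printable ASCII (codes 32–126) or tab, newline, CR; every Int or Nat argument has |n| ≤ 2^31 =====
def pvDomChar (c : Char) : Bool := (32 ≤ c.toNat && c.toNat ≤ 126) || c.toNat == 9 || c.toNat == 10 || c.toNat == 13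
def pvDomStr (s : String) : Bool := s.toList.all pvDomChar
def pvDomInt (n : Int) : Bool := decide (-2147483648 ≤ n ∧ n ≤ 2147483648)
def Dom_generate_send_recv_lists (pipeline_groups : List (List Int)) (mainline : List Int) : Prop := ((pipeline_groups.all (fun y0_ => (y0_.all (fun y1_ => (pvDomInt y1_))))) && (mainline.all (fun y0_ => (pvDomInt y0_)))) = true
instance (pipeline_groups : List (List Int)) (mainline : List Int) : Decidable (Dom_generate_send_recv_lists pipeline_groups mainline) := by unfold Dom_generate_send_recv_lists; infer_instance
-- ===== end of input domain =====

-- B replaces A's per-edge membership scans of the output lists by a two-pass scheme: first an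
-- insertion-ordered edge dict recording each directed edge once (setdefault), then one distribution
-- pass appending to the four per-rank lists; same return value, different decomposition.

-- the state: (SendList, RecvList, SendBoolean, RecvBoolean)
def pvSt : Type := (PySem.Dict Int (List Int)) × (PySem.Dict Int (List Int)) × (PySem.Dict Int (List Bool)) × (PySem.Dict Int (List Bool))

-- {rank: [] for rank in ranks}  (shared by both Pythons verbatim)
def pvInitDict (ν : Type) (ranks : List Int) : PySem.Dict Int (List ν) :=
  ranks.foldl (fun d r => d.insert r []) PySem.Dict.empty

-- ===== PORT A =====
-- body of A's inner loop (the two dedup-checked appends), notMain = not is_mainline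
def pvStepA (notMain : Bool) (st : pvSt) (s d : Int) : pvSt :=
  let SL := st.1; let RL := st.2.1; let SB := st.2.2.1; let RB := st.2.2.2
  let p1 := if (SL.getD s []).contains d then (SL, SB)
            else (SL.insert s (SL.getD s [] ++ [d]), SB.insert s (SB.getD s [] ++ [notMain]))
  let p2 := if (RL.getD d []).contains s then (RL, RB)
            else (RL.insert d (RL.getD d [] ++ [s]), RB.insert d (RB.getD d [] ++ [notMain]))
  (p1.1, p2.1, p1.2, p2.2)

def generate_send_recv_lists (pipeline_groups : List (List Int)) (mainline : List Int) : (List (Int × List Int)) × (List (Int × List Int)) × (List (Int × List Bool)) × (List (Int × List Bool)) :=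
  let ranks : PySem.Set Int := PySem.Set.ofList (pipeline_groups.flatMap (fun g => g))
  let st0 : pvSt := (pvInitDict Int ranks, pvInitDict Int ranks, pvInitDict Bool ranks, pvInitDict Bool ranks)
  let fin := pipeline_groups.foldl (fun st group =>
    let is_mainline := PySem.Set.equal (PySem.Set.ofList group) (PySem.Set.ofList mainline)
    (PySem.List.pyRange 0 (PySem.List.len group - 1) 1).foldl
      (fun st i => pvStepA (!is_mainline) st (PySem.List.pyGetD group i 0) (PySem.List.pyGetD group (i+1) 0)) st) st0
  (fin.1.items, fin.2.1.items, fin.2.2.1.items, fin.2.2.2.items)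

-- ===== PORT B =====
-- body of B's second pass: distribute one deduplicated edge ((s,d),flag)
def pvStepB (st : pvSt) (e : (Int × Int) × Bool) : pvSt :=
  (st.1.modify e.1.1 [] (· ++ [e.1.2]), st.2.1.modify e.1.2 [] (· ++ [e.1.1]),
   st.2.2.1.modify e.1.1 [] (· ++ [e.2]), st.2.2.2.modify e.1.2 [] (· ++ [e.2]))

def generate_send_recv_lists_alt (pipeline_groups : List (List Int)) (mainline : List Int) : (List (Int × List Int)) × (List (Int × List Int)) × (List (Int × List Bool)) × (List (Int × List Bool)) :=
  let ranks : PySem.Set Int := PySem.Set.ofList (pipeline_groups.flatMap (fun g => g))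
  let st0 : pvSt := (pvInitDict Int ranks, pvInitDict Int ranks, pvInitDict Bool ranks, pvInitDict Bool ranks)
  -- pass 1: edge_flag via setdefault over zip(group, group[1:])
  let edge_flag : PySem.Dict (Int × Int) Bool := pipeline_groups.foldl (fun ef group =>
    let flag := !(PySem.Set.equal (PySem.Set.ofList group) (PySem.Set.ofList mainline))
    (group.zip (PySem.List.slice group (some 1) none)).foldl (fun ef p => ef.setdefault p flag) ef) PySem.Dict.empty
  -- pass 2: distribute edge_flag.items() in insertion order
  let fin := edge_flag.items.foldl pvStepB st0
  (fin.1.items, fin.2.1.items, fin.2.2.1.items, fin.2.2.2.items)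

-- ===== PRECONDITION & SPEC =====
def Spec_generate_send_recv_lists (pipeline_groups : List (List Int)) (mainline : List Int) (out : (List (Int × List Int)) × (List (Int × List Int)) × (List (Int × List Bool)) × (List (Int × List Bool))) : Prop := out = generate_send_recv_lists_alt pipeline_groups mainline
instance (pipeline_groups : List (List Int)) (mainline : List Int) (out : (List (Int × List Int)) × (List (Int × List Int)) × (List (Int × List Bool)) × (List (Int × List Bool))) : Decidable (Spec_generate_send_recv_lists pipeline_groups mainline out) := by
  unfold Spec_generate_send_recv_lists
  haveI h1 : DecidableEq ((List (Int × List Bool)) × (List (Int × List Bool))) := instDecidableEqProd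
  haveI h2 : DecidableEq ((List (Int × List Int)) × (List (Int × List Bool)) × (List (Int × List Bool))) := @instDecidableEqProd _ _ _ h1
  haveI h3 : DecidableEq ((List (Int × List Int)) × (List (Int × List Int)) × (List (Int × List Bool)) × (List (Int × List Bool))) := @instDecidableEqProd _ _ _ h2
  exact h3 _ _

-- ===== CLAIM (what is proved, stated in full; the proofs are below) =====
def Claim_equal_generate_send_recv_lists : Prop := ∀ (pipeline_groups : List (List Int)) (mainline : List Int), Dom_generate_send_recv_lists pipeline_groups mainline → Spec_generate_send_recv_lists pipeline_groups mainline (generate_send_recv_lists pipeline_groups mainline)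

-- ===== LEMMAS AND PROOFS =====

-- the flag A/B record for an edge coming from `g`
def pvFlag (mainline g : List Int) : Bool := !(PySem.Set.equal (PySem.Set.ofList g) (PySem.Set.ofList mainline))

-- the flattened stream of (edge, flag) occurrences, in program order
def pvStreamOf (pipeline_groups : List (List Int)) (mainline : List Int) : List ((Int × Int) × Bool) :=
  pipeline_groups.flatMap (fun g => (g.zip g.tail).map (fun p => (p, pvFlag mainline g)))

-- first-occurrence dedup of a stream, given the set of edges already seen
def pvDedup (seen : List (Int × Int)) : List ((Int × Int) × Bool) → List ((Int × Int) × Bool)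
  | [] => []
  | e :: rest => if e.1 ∈ seen then pvDedup seen rest else e :: pvDedup (seen ++ [e.1]) rest

-- Nat-indexed form of A's inner loop
theorem pvRangeFoldNat {σ : Type} (g : List Int) (f : σ → Int → Int → σ) (st : σ) :
    (List.range (g.length - 1)).foldl (fun st k => f st (g.getD k 0) (g.getD (k+1) 0)) st
    = (g.zip g.tail).foldl (fun st p => f st p.1 p.2) st := by
  induction g generalizing st with
  | nil => simp
  | cons a t ih =>
    cases t with
    | nil => simp
    | cons b t' =>
      have hlen : (a :: b :: t').length - 1 = (b :: t').length - 1 + 1 := by simp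
      rw [hlen, List.range_succ_eq_map, List.foldl_cons, List.foldl_map]
      simpa using ih (f st a b)

-- A's inner pyRange loop is the fold over adjacent pairs
theorem pvRangeFold {σ : Type} (g : List Int) (f : σ → Int → Int → σ) (st : σ) :
    (PySem.List.pyRange 0 (PySem.List.len g - 1) 1).foldl
      (fun st i => f st (PySem.List.pyGetD g i 0) (PySem.List.pyGetD g (i+1) 0)) st
    = (g.zip g.tail).foldl (fun st p => f st p.1 p.2) st := by
  cases g with
  | nil => rfl
  | cons a t =>
    have hlen : PySem.List.len (a :: t) - 1 = ((a :: t).length - 1 : Nat) := by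
      simp [PySem.List.len_eq]
    rw [hlen, PySem.List.pyRange_zero_natCast, List.foldl_map]
    have hfun : (fun (x : σ) (y : Nat) => f x (PySem.List.pyGetD (a :: t) (y : Int) 0) (PySem.List.pyGetD (a :: t) ((y : Int)+1) 0))
        = fun (x : σ) (y : Nat) => f x ((a :: t).getD y 0) ((a :: t).getD (y+1) 0) := by
      funext x y
      rw [show ((y : Int) + 1) = ((y + 1 : Nat) : Int) by push_cast; ring,
        PySem.List.pyGetD_natCast, PySem.List.pyGetD_natCast]
    rw [hfun]
    exact pvRangeFoldNat _ f st

-- the setdefault fold appends exactly the first occurrences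
theorem pvSetdefaultFold (S : List ((Int × Int) × Bool)) (E : PySem.Dict (Int × Int) Bool) :
    (S.foldl (fun ef e => ef.setdefault e.1 e.2) E).items = E.items ++ pvDedup E.keys S := by
  induction S generalizing E with
  | nil => simp [pvDedup]
  | cons e rest ih =>
    rw [List.foldl_cons]
    by_cases hc : E.contains e.1 = true
    · have hm : e.1 ∈ E.keys := by
        rw [PySem.Dict.contains_eq_decide_mem_keys] at hc; simpa using hc
      rw [PySem.Dict.setdefault_of_contains _ _ hc, ih]
      simp [pvDedup, hm]
    · have hc' : E.contains e.1 = false := by simpa using hc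
      have hm : e.1 ∉ E.keys := by
        rw [PySem.Dict.contains_eq_decide_mem_keys] at hc'; simpa using hc'
      have hitems := PySem.Dict.items_insert_of_not_contains E e.2 hc'
      have hkeys : (E.insert e.1 e.2).keys = E.keys ++ [e.1] := by
        simp [PySem.Dict.keys, hitems]
      rw [PySem.Dict.setdefault_of_not_contains _ _ hc', ih, hitems, hkeys]
      simp [pvDedup, hm]

def pvInv (st : pvSt) (seen : List (Int × Int)) : Prop :=
  (∀ s d : Int, ((st.1.getD s []).contains d = true) ↔ (s, d) ∈ seen) ∧
  (∀ s d : Int, ((st.2.1.getD d []).contains s = true) ↔ (s, d) ∈ seen)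

-- main invariant: A's fold over the raw stream = B's fold over the deduplicated stream
theorem pvMain (S : List ((Int × Int) × Bool)) (st : pvSt) (seen : List (Int × Int))
    (h : pvInv st seen) :
    S.foldl (fun st e => pvStepA e.2 st e.1.1 e.1.2) st = (pvDedup seen S).foldl pvStepB st := by
  induction S generalizing st seen with
  | nil => rfl
  | cons e rest ih =>
    obtain ⟨h1, h2⟩ := h
    rw [List.foldl_cons]
    by_cases hm : e.1 ∈ seen
    · have hm' : (e.1.1, e.1.2) ∈ seen := by simpa using hm
      have hstep : pvStepA e.2 st e.1.1 e.1.2 = st := by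
        dsimp only [pvStepA]
        rw [if_pos ((h1 e.1.1 e.1.2).mpr hm'), if_pos ((h2 e.1.1 e.1.2).mpr hm')]
        rfl
      have hded : pvDedup seen (e :: rest) = pvDedup seen rest := by
        simp only [pvDedup]; rw [if_pos hm]
      rw [hstep, hded]
      exact ih st seen ⟨h1, h2⟩
    · have hm' : ¬ (e.1.1, e.1.2) ∈ seen := by simpa using hm
      have hc1 : ¬ ((st.1.getD e.1.1 []).contains e.1.2 = true) :=
        fun ht => hm' ((h1 _ _).mp ht)
      have hc2 : ¬ ((st.2.1.getD e.1.2 []).contains e.1.1 = true) :=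
        fun ht => hm' ((h2 _ _).mp ht)
      have hstep : pvStepA e.2 st e.1.1 e.1.2 = pvStepB st e := by
        dsimp only [pvStepA, pvStepB, PySem.Dict.modify]
        rw [if_neg hc1, if_neg hc2]
      have h1' : ∀ s d : Int, d ∈ st.1.getD s [] ↔ (s, d) ∈ seen :=
        fun s d => (List.contains_iff_mem).symm.trans (h1 s d)
      have h2' : ∀ s d : Int, s ∈ st.2.1.getD d [] ↔ (s, d) ∈ seen :=
        fun s d => (List.contains_iff_mem).symm.trans (h2 s d)
      have hinv : pvInv (pvStepB st e) (seen ++ [e.1]) := by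
        constructor
        · intro s d
          show (((st.1.modify e.1.1 [] (· ++ [e.1.2])).getD s []).contains d = true) ↔ _
          unfold PySem.Dict.modify
          rw [PySem.Dict.getD_insert]
          by_cases hs : s = e.1.1
          · subst hs
            simp [h1', Prod.ext_iff]
          · simp [hs, h1', Prod.ext_iff]
        · intro s d
          show (((st.2.1.modify e.1.2 [] (· ++ [e.1.1])).getD d []).contains s = true) ↔ _
          unfold PySem.Dict.modify
          rw [PySem.Dict.getD_insert]
          by_cases hd' : d = e.1.2
          · subst hd'
            simp [h2', Prod.ext_iff]
          · simp [hd', h2', Prod.ext_iff]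
      have hded : pvDedup seen (e :: rest) = e :: pvDedup (seen ++ [e.1]) rest := by
        simp only [pvDedup]; rw [if_neg hm]
      rw [hstep, hded, List.foldl_cons]
      exact ih (pvStepB st e) (seen ++ [e.1]) hinv

theorem pvInitGetD (ν : Type) (l : List Int) (d : PySem.Dict Int (List ν)) (h : ∀ k, d.getD k [] = [])
    (k : Int) : (l.foldl (fun d r => d.insert r []) d).getD k [] = [] := by
  induction l generalizing d with
  | nil => exact h k
  | cons x xs ih =>
    refine ih _ (fun k' => ?_)
    rw [PySem.Dict.getD_insert]
    split <;> simp [h]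

-- A's nested loop, written as in the port, equals B's distribution fold
theorem pvAfold (pg : List (List Int)) (ml : List Int) (st0 : pvSt) (h : pvInv st0 []) :
    pg.foldl (fun st group =>
      (PySem.List.pyRange 0 (PySem.List.len group - 1)).foldl
        (fun st i => pvStepA (!(PySem.Set.ofList group).equal (PySem.Set.ofList ml)) st
          (PySem.List.pyGetD group i 0) (PySem.List.pyGetD group (i + 1) 0)) st) st0
    = (pvDedup [] (pvStreamOf pg ml)).foldl pvStepB st0 := by
  rw [← pvMain (pvStreamOf pg ml) st0 [] h]
  unfold pvStreamOf
  rw [List.foldl_flatMap]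
  congr 1
  funext st g
  rw [List.foldl_map]
  dsimp only [pvFlag]
  exact pvRangeFold g (fun st a b => pvStepA (!(PySem.Set.ofList g).equal (PySem.Set.ofList ml)) st a b) st

-- B's edge_flag pass produces exactly the deduplicated stream
theorem pvBfold (pg : List (List Int)) (ml : List Int) :
    (pg.foldl (fun ef group =>
      (group.zip (PySem.List.slice group (some 1) none)).foldl
        (fun ef p => ef.setdefault p (!(PySem.Set.ofList group).equal (PySem.Set.ofList ml))) ef)
      PySem.Dict.empty).items = pvDedup [] (pvStreamOf pg ml) := by
  have h1 : pg.foldl (fun ef group =>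
      (group.zip (PySem.List.slice group (some 1) none)).foldl
        (fun ef p => ef.setdefault p (!(PySem.Set.ofList group).equal (PySem.Set.ofList ml))) ef)
      PySem.Dict.empty
      = (pvStreamOf pg ml).foldl (fun ef e => ef.setdefault e.1 e.2) PySem.Dict.empty := by
    unfold pvStreamOf
    rw [List.foldl_flatMap]
    congr 1
    funext ef g
    rw [List.foldl_map]
    dsimp only [pvFlag]
    rw [PySem.List.slice_from_one]
  rw [h1, pvSetdefaultFold, PySem.Dict.keys_empty]
  rw [show PySem.Dict.empty.items = ([] : List ((Int × Int) × Bool)) from rfl]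
  rfl

theorem pvFinal (pg : List (List Int)) (ml : List Int) :
    generate_send_recv_lists pg ml = generate_send_recv_lists_alt pg ml := by
  unfold generate_send_recv_lists generate_send_recv_lists_alt
  dsimp only
  have hg : ∀ (ν : Type) (k : Int),
      (pvInitDict ν (PySem.Set.ofList (List.flatMap (fun g => g) pg))).getD k [] = [] := by
    intro ν k
    unfold pvInitDict
    exact pvInitGetD ν _ PySem.Dict.empty (fun k' => by simp [pysem]) k
  have hst0 : pvInv (pvInitDict Int (PySem.Set.ofList (List.flatMap (fun g => g) pg)),
      pvInitDict Int (PySem.Set.ofList (List.flatMap (fun g => g) pg)),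
      pvInitDict Bool (PySem.Set.ofList (List.flatMap (fun g => g) pg)),
      pvInitDict Bool (PySem.Set.ofList (List.flatMap (fun g => g) pg))) [] := by
    constructor
    · intro s d
      show (((pvInitDict Int (PySem.Set.ofList (List.flatMap (fun g => g) pg))).getD s []).contains d = true) ↔ _
      rw [hg Int s]
      simp
    · intro s d
      show (((pvInitDict Int (PySem.Set.ofList (List.flatMap (fun g => g) pg))).getD d []).contains s = true) ↔ _
      rw [hg Int d]
      simp
  rw [pvAfold pg ml _ hst0, pvBfold]

-- ===== VERDICT (by name: the statement is the Claim_ definition above) =====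
theorem generate_send_recv_lists_spec : Claim_equal_generate_send_recv_lists := by
  intro pg ml _
  exact pvFinal pg ml
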